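-- pv_equiv track=rewrite | github.com/KIMTHE/algorithm-study | TheSim_ps/CodeTest/2022wintercoding_2.py | solution
-- ===== SOURCE A (Python) =====
-- def solution(n, student, point):
--     answer = 0
--
--     high=[]
--     low=[]
--     for i in range(1,(n+1)//2+1):
--         high.append([i,0])
--
--     for i in range((n+1)//2+1,n+1):
--         low.append([i,0])
--
--
--     for i in range(len(student)):
--         for j in high:
--             if j[0]==student[i]:
--                 j[1]+=point[i]
--                 break
--         for j in low:
--             if j[0]==student[i]:
--                 j[1]+=point[i]
--                 break
--
--         high.sort(key=lambda x:(-x[1],x[0]))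
--         low.sort(key=lambda x:(x[1],x[0]))
--
--         if high[-1][1]<=low[-1][1]:
--
--             if high[-1][1]==low[-1][1] and high[-1][0]<low[-1][0]:
--                 continue
--             h=high.pop()
--             l=low.pop()
--             high.append(l)
--             low.append(h)
--             answer+=1
--
--     return answer
-- ===== SOURCE B (Python) =====
-- def solution(n, student, point):
--     mid = (n + 1) // 2
--     high = [(i, 0) for i in range(1, mid + 1)]
--     low = [(i, 0) for i in range(mid + 1, n + 1)]
--     answer = 0
--     for sid, pt in zip(student, point):
--         high = [(i, p + pt) if i == sid else (i, p) for (i, p) in high]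
--         low = [(i, p + pt) if i == sid else (i, p) for (i, p) in low]
--         h = min(high, key=lambda e: (e[1], -e[0]))
--         l = max(low, key=lambda e: (e[1], e[0]))
--         if (h[1], -h[0]) < (l[1], -l[0]):
--             high = [l if e == h else e for e in high]
--             low = [h if e == l else e for e in low]
--             answer += 1
--     return answer
-- ===== Notes on version B (the rewrite author's own statement) =====
-- stated objective: alternative
-- what changed: B drops A's per-iteration full sort of both lists and its linear search-with-break mutation: it keeps (id, points) pairs updated by a pointwise functional comprehension, selects the worst-high/best-low element in one min/max pass with an explicit lexicographic key, and swaps by replace-in-place, with the swap test written as a single tuple comparison.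
import Mathlib
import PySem

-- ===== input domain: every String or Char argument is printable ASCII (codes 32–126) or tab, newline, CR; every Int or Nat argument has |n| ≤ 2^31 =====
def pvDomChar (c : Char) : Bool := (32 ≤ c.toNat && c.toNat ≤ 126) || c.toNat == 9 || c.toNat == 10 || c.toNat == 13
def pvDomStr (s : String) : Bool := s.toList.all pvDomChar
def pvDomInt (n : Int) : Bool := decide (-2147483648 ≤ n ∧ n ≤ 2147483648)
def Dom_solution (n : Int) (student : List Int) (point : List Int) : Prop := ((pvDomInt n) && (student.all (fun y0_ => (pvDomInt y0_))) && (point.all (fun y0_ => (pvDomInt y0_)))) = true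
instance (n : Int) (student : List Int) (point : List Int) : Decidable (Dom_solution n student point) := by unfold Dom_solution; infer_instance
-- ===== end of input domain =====

-- B replaces A's per-step full sort + linear search-with-break by functional pointwise updates
-- and single-pass min/max selection with an explicit lexicographic key (alternative algorithm, same cost class).


-- loop state: (high, low, answer)
abbrev PvSt : Type := List (Int × Int) × List (Int × Int) × Int

-- ===== PORT A =====
-- 'for j in high: if j[0]==sid: j[1]+=pt; break' — update the first pair whose id matches
-- (accumulator form so that evaluation is tail-recursive; addFirst_cons below is the plain recursion)
def addFirstAux (sid pt : Int) (acc : List (Int × Int)) : List (Int × Int) → List (Int × Int)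
  | [] => acc.reverse
  | e :: rest =>
    if e.1 = sid then acc.reverse ++ (e.1, e.2 + pt) :: rest
    else addFirstAux sid pt (e :: acc) rest

def addFirst (sid pt : Int) (xs : List (Int × Int)) : List (Int × Int) := addFirstAux sid pt [] xs

-- 'high.sort(key=lambda x: (-x[1], x[0]))' / 'low.sort(key=lambda x: (x[1], x[0]))': Python's list.sort is a
-- stable ascending sort by the key; ported as the stable List.mergeSort with the same lexicographic
-- comparison (PySem's insertion-sort primitive computes the same list but is too slow to evaluate).
def sortHighA (xs : List (Int × Int)) : List (Int × Int) :=
  xs.mergeSort (fun a b => !(decide (-b.2 < -a.2) || (!decide (-a.2 < -b.2) && decide (b.1 < a.1))))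
def sortLowA (xs : List (Int × Int)) : List (Int × Int) :=
  xs.mergeSort (fun a b => !(decide (b.2 < a.2) || (!decide (a.2 < b.2) && decide (b.1 < a.1))))

-- one iteration of A's main loop
def stepA (sid pt : Int) : PvSt → PvSt
  | (H, L, ans) =>
    let high1 := addFirst sid pt H
    let low1 := addFirst sid pt L
    let high := sortHighA high1
    let low := sortLowA low1
    let h := PySem.List.pyGetD high (-1) (0, 0)
    let l := PySem.List.pyGetD low (-1) (0, 0)
    if h.2 ≤ l.2 then
      if h.2 = l.2 ∧ h.1 < l.1 then (high, low, ans)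
      else (high.dropLast ++ [l], low.dropLast ++ [h], ans + 1)
    else (high, low, ans)

def solution (n : Int) (student : List Int) (point : List Int) : Int :=
  let mid := PySem.Int.floordiv (n + 1) 2
  let high := (PySem.List.pyRange 1 (mid + 1) 1).map (fun i => (i, (0 : Int)))
  let low := (PySem.List.pyRange (mid + 1) (n + 1) 1).map (fun i => (i, (0 : Int)))
  ((PySem.List.pyRange 0 (PySem.List.len student) 1).foldl
      (fun st i => stepA (PySem.List.pyGetD student i 0) (PySem.List.pyGetD point i 0) st)
      (high, low, 0)).2.2

-- ===== PORT B =====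
-- '[(i, p + pt) if i == sid else (i, p) for (i, p) in xs]'
def updAll (sid pt : Int) (xs : List (Int × Int)) : List (Int × Int) :=
  xs.map (fun e => if e.1 = sid then (e.1, e.2 + pt) else e)

-- one iteration of B's loop: pointwise update, min/max by lexicographic key, replace-in-place swap.
-- Python's min/max raise ValueError on an empty list (excluded by Pre_); the port reads the Option
-- with a default that is only reached there.
def stepB (sid pt : Int) : PvSt → PvSt
  | (H, L, ans) =>
    let high := updAll sid pt H
    let low := updAll sid pt L
    let h := (PySem.List.min2? high (fun e => e.2) (fun e => -e.1)).getD (0, 0)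
    let l := (PySem.List.max2? low (fun e => e.2) (fun e => e.1)).getD (0, 0)
    if h.2 < l.2 ∨ (h.2 = l.2 ∧ -h.1 < -l.1) then
      (high.map (fun e => if e = h then l else e),
       low.map (fun e => if e = l then h else e), ans + 1)
    else (high, low, ans)

def solution_alt (n : Int) (student : List Int) (point : List Int) : Int :=
  let mid := PySem.Int.floordiv (n + 1) 2
  let high := (PySem.List.pyRange 1 (mid + 1) 1).map (fun i => (i, (0 : Int)))
  let low := (PySem.List.pyRange (mid + 1) (n + 1) 1).map (fun i => (i, (0 : Int)))
  ((student.zip point).foldl (fun st q => stepB q.1 q.2 st) (high, low, 0)).2.2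

-- ===== PRECONDITION & SPEC =====
-- Pre_ excludes exactly the inputs where A raises: point shorter than student (IndexError on point[i]),
-- and a nonempty student list with n < 2 (high or low is empty, IndexError on high[-1]/low[-1]).
def Pre_solution (n : Int) (student : List Int) (point : List Int) : Prop :=
  student.length ≤ point.length ∧ (student ≠ [] → 2 ≤ n)
instance (n : Int) (student : List Int) (point : List Int) : Decidable (Pre_solution n student point) := by unfold Pre_solution; infer_instance

def pvWitness_solution : Int × List Int × List Int := (4, [1, 3, 1, 4], [5, 2, -3, 7])

def Spec_solution (n : Int) (student : List Int) (point : List Int) (out : Int) : Prop := out = solution_alt n student point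
instance (n : Int) (student : List Int) (point : List Int) (out : Int) : Decidable (Spec_solution n student point out) := by unfold Spec_solution; infer_instance

-- ===== CLAIM (what is proved, stated in full; the proofs are below) =====
def Claim_equal_solution : Prop := ∀ (n : Int) (student : List Int) (point : List Int), Dom_solution n student point → Pre_solution n student point → Spec_solution n student point (solution n student point)

-- ===== LEMMAS AND PROOFS =====

-- the characterising property of the two selections (worst-of-high / best-of-low)
def pickH (xs : List (Int × Int)) (m : Int × Int) : Prop :=
  m ∈ xs ∧ ∀ y ∈ xs, m.2 < y.2 ∨ (m.2 = y.2 ∧ y.1 ≤ m.1)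
def pickL (xs : List (Int × Int)) (m : Int × Int) : Prop :=
  m ∈ xs ∧ ∀ y ∈ xs, y.2 < m.2 ∨ (y.2 = m.2 ∧ y.1 ≤ m.1)

-- invariant between A's and B's loop states
def PvInv (a b : PvSt) : Prop :=
  a.2.2 = b.2.2 ∧ a.1.Perm b.1 ∧ a.2.1.Perm b.2.1 ∧
  (b.1.map Prod.fst).Nodup ∧ (b.2.1.map Prod.fst).Nodup ∧
  (∀ k, k ∈ b.1.map Prod.fst → k ∉ b.2.1.map Prod.fst) ∧
  b.1 ≠ [] ∧ b.2.1 ≠ []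

-- the last element of a pairwise-ordered list is related to every earlier element
lemma getLast_pairwise {α : Type} {P : α → α → Prop} {l : List α} (hp : l.Pairwise P)
    (hne : l ≠ []) : ∀ y ∈ l, y = l.getLast hne ∨ P y (l.getLast hne) := by
  intro y hy
  have hsplit := List.dropLast_append_getLast hne
  rw [← hsplit] at hp hy
  rcases List.mem_append.mp hy with h' | h'
  · right
    exact (List.pairwise_append.mp hp).2.2 y h' _ (List.mem_singleton_self _)
  · left
    simpa using h'

-- A's high selection satisfies pickH
lemma pickH_sortedA (xs : List (Int × Int)) (hne : xs ≠ []) :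
    pickH xs (PySem.List.pyGetD (sortHighA xs) (-1) (0, 0)) := by
  have hperm : (sortHighA xs).Perm xs := List.mergeSort_perm xs _
  have hne2 : sortHighA xs ≠ [] := by
    intro h0; rw [h0] at hperm; exact hne hperm.nil_eq.symm
  have hp : (sortHighA xs).Pairwise
      (fun a b => (!(decide (-b.2 < -a.2) || (!decide (-a.2 < -b.2) && decide (b.1 < a.1)))) = true) := by
    unfold sortHighA
    refine List.pairwise_mergeSort ?_ ?_ xs
    · intro a b c h1 h2
      simp only [Bool.not_eq_true', Bool.not_eq_false', Bool.or_eq_true, Bool.or_eq_false_iff,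
        Bool.and_eq_true, Bool.and_eq_false_iff, decide_eq_true_eq, decide_eq_false_iff_not] at h1 h2 ⊢
      omega
    · intro a b
      simp only [Bool.or_eq_true, Bool.not_eq_true', Bool.not_eq_false', Bool.or_eq_false_iff,
        Bool.and_eq_true, Bool.and_eq_false_iff, decide_eq_true_eq, decide_eq_false_iff_not]
      omega
  rw [PySem.List.pyGetD_neg_one _ _ hne2]
  constructor
  · exact hperm.mem_iff.mp (List.getLast_mem hne2)
  · intro y hy
    cases getLast_pairwise hp hne2 y (hperm.mem_iff.mpr hy) with
    | inl h' => right; rw [h']; exact ⟨rfl, le_refl _⟩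
    | inr h' =>
      simp only [Bool.not_eq_true', Bool.or_eq_false_iff, Bool.and_eq_false_iff, Bool.not_eq_false',
        decide_eq_true_eq, decide_eq_false_iff_not] at h'
      omega

-- A's low selection satisfies pickL
lemma pickL_sortedA (xs : List (Int × Int)) (hne : xs ≠ []) :
    pickL xs (PySem.List.pyGetD (sortLowA xs) (-1) (0, 0)) := by
  have hperm : (sortLowA xs).Perm xs := List.mergeSort_perm xs _
  have hne2 : sortLowA xs ≠ [] := by
    intro h0; rw [h0] at hperm; exact hne hperm.nil_eq.symm
  have hp : (sortLowA xs).Pairwise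
      (fun a b => (!(decide (b.2 < a.2) || (!decide (a.2 < b.2) && decide (b.1 < a.1)))) = true) := by
    unfold sortLowA
    refine List.pairwise_mergeSort ?_ ?_ xs
    · intro a b c h1 h2
      simp only [Bool.not_eq_true', Bool.not_eq_false', Bool.or_eq_true, Bool.or_eq_false_iff,
        Bool.and_eq_true, Bool.and_eq_false_iff, decide_eq_true_eq, decide_eq_false_iff_not] at h1 h2 ⊢
      omega
    · intro a b
      simp only [Bool.or_eq_true, Bool.not_eq_true', Bool.not_eq_false', Bool.or_eq_false_iff,
        Bool.and_eq_true, Bool.and_eq_false_iff, decide_eq_true_eq, decide_eq_false_iff_not]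
      omega
  rw [PySem.List.pyGetD_neg_one _ _ hne2]
  constructor
  · exact hperm.mem_iff.mp (List.getLast_mem hne2)
  · intro y hy
    cases getLast_pairwise hp hne2 y (hperm.mem_iff.mpr hy) with
    | inl h' => right; rw [h']; exact ⟨rfl, le_refl _⟩
    | inr h' =>
      simp only [Bool.not_eq_true', Bool.or_eq_false_iff, Bool.and_eq_false_iff, Bool.not_eq_false',
        decide_eq_true_eq, decide_eq_false_iff_not] at h'
      omega

-- running-minimum / running-maximum helpers mirroring min2?'s / max2?'s fold (proof helpers)
def minHgo (m : Int × Int) : List (Int × Int) → Int × Int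
  | [] => m
  | x :: rest =>
      minHgo (if (decide (x.2 < m.2) || (!decide (m.2 < x.2) && decide (-x.1 < -m.1))) = true then x else m) rest

def maxLgo (m : Int × Int) : List (Int × Int) → Int × Int
  | [] => m
  | x :: rest =>
      maxLgo (if (decide (m.2 < x.2) || (!decide (x.2 < m.2) && decide (m.1 < x.1))) = true then x else m) rest

lemma min2?_cons (x : Int × Int) (rest : List (Int × Int)) :
    PySem.List.min2? (x :: rest) (fun e => e.2) (fun e => -e.1) = some (minHgo x rest) := by
  suffices h : ∀ (rest : List (Int × Int)) (m : Int × Int),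
      rest.foldl (fun acc y => match acc with
        | none => some y
        | some mm => if (decide (y.2 < mm.2) || (!decide (mm.2 < y.2) && decide (-y.1 < -mm.1))) = true
            then some y else some mm) (some m) = some (minHgo m rest) by
    rw [show PySem.List.min2? (x :: rest) (fun e => e.2) (fun e => -e.1)
        = rest.foldl (fun acc y => match acc with
          | none => some y
          | some mm => if (decide (y.2 < mm.2) || (!decide (mm.2 < y.2) && decide (-y.1 < -mm.1))) = true
              then some y else some mm) (some x) from by
      unfold PySem.List.min2?
      simp only [List.foldl_cons]
      apply PySem.List.foldl_congr_mem
      intro acc y _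
      cases acc <;> rfl]
    exact h rest x
  intro rest
  induction rest with
  | nil => intro m; rfl
  | cons y t ih =>
    intro m
    simp only [List.foldl_cons]
    rw [← apply_ite some, ih]
    rfl

lemma max2?_cons (x : Int × Int) (rest : List (Int × Int)) :
    PySem.List.max2? (x :: rest) (fun e => e.2) (fun e => e.1) = some (maxLgo x rest) := by
  suffices h : ∀ (rest : List (Int × Int)) (m : Int × Int),
      rest.foldl (fun acc y => match acc with
        | none => some y
        | some mm => if (decide (mm.2 < y.2) || (!decide (y.2 < mm.2) && decide (mm.1 < y.1))) = true
            then some y else some mm) (some m) = some (maxLgo m rest) by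
    rw [show PySem.List.max2? (x :: rest) (fun e => e.2) (fun e => e.1)
        = rest.foldl (fun acc y => match acc with
          | none => some y
          | some mm => if (decide (mm.2 < y.2) || (!decide (y.2 < mm.2) && decide (mm.1 < y.1))) = true
              then some y else some mm) (some x) from by
      unfold PySem.List.max2?
      simp only [List.foldl_cons]
      apply PySem.List.foldl_congr_mem
      intro acc y _
      cases acc <;> rfl]
    exact h rest x
  intro rest
  induction rest with
  | nil => intro m; rfl
  | cons y t ih =>
    intro m
    simp only [List.foldl_cons]
    rw [← apply_ite some, ih]
    rfl

lemma minHgo_spec : ∀ (rest : List (Int × Int)) (m : Int × Int),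
    (minHgo m rest = m ∨ minHgo m rest ∈ rest) ∧
    (∀ y ∈ rest, (minHgo m rest).2 < y.2 ∨ ((minHgo m rest).2 = y.2 ∧ y.1 ≤ (minHgo m rest).1)) ∧
    ((minHgo m rest).2 < m.2 ∨ ((minHgo m rest).2 = m.2 ∧ m.1 ≤ (minHgo m rest).1)) := by
  intro rest
  induction rest with
  | nil => intro m; exact ⟨Or.inl rfl, fun y hy => (List.not_mem_nil hy).elim, by simp [minHgo]⟩
  | cons x t ih =>
    intro m
    by_cases hc : (decide (x.2 < m.2) || (!decide (m.2 < x.2) && decide (-x.1 < -m.1))) = true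
    · have harith : x.2 < m.2 ∨ (x.2 = m.2 ∧ m.1 < x.1) := by
        simp only [Bool.or_eq_true, Bool.and_eq_true, Bool.not_eq_true',
          decide_eq_true_eq, decide_eq_false_iff_not] at hc
        omega
      have hgo : minHgo m (x :: t) = minHgo x t := by rw [minHgo, if_pos hc]
      obtain ⟨hm1, hm2, hm3⟩ := ih x
      rw [hgo]
      refine ⟨?_, ?_, by omega⟩
      · rcases hm1 with h' | h'
        · rw [h']; exact Or.inr List.mem_cons_self
        · exact Or.inr (List.mem_cons_of_mem _ h')
      · intro y hy
        cases List.mem_cons.mp hy with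
        | inl h' => subst h'; omega
        | inr h' => exact hm2 y h'
    · have harith : m.2 < x.2 ∨ (m.2 = x.2 ∧ x.1 ≤ m.1) := by
        simp only [Bool.or_eq_true, Bool.and_eq_true, Bool.not_eq_true',
          decide_eq_true_eq, decide_eq_false_iff_not] at hc
        omega
      have hgo : minHgo m (x :: t) = minHgo m t := by rw [minHgo, if_neg hc]
      obtain ⟨hm1, hm2, hm3⟩ := ih m
      rw [hgo]
      refine ⟨?_, ?_, hm3⟩
      · rcases hm1 with h' | h'
        · exact Or.inl h'
        · exact Or.inr (List.mem_cons_of_mem _ h')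
      · intro y hy
        cases List.mem_cons.mp hy with
        | inl h' => subst h'; omega
        | inr h' => exact hm2 y h'

lemma maxLgo_spec : ∀ (rest : List (Int × Int)) (m : Int × Int),
    (maxLgo m rest = m ∨ maxLgo m rest ∈ rest) ∧
    (∀ y ∈ rest, y.2 < (maxLgo m rest).2 ∨ (y.2 = (maxLgo m rest).2 ∧ y.1 ≤ (maxLgo m rest).1)) ∧
    (m.2 < (maxLgo m rest).2 ∨ (m.2 = (maxLgo m rest).2 ∧ m.1 ≤ (maxLgo m rest).1)) := by
  intro rest
  induction rest with
  | nil => intro m; exact ⟨Or.inl rfl, fun y hy => (List.not_mem_nil hy).elim, by simp [maxLgo]⟩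
  | cons x t ih =>
    intro m
    by_cases hc : (decide (m.2 < x.2) || (!decide (x.2 < m.2) && decide (m.1 < x.1))) = true
    · have harith : m.2 < x.2 ∨ (m.2 = x.2 ∧ m.1 < x.1) := by
        simp only [Bool.or_eq_true, Bool.and_eq_true, Bool.not_eq_true',
          decide_eq_true_eq, decide_eq_false_iff_not] at hc
        omega
      have hgo : maxLgo m (x :: t) = maxLgo x t := by rw [maxLgo, if_pos hc]
      obtain ⟨hm1, hm2, hm3⟩ := ih x
      rw [hgo]
      refine ⟨?_, ?_, by omega⟩
      · rcases hm1 with h' | h'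
        · rw [h']; exact Or.inr List.mem_cons_self
        · exact Or.inr (List.mem_cons_of_mem _ h')
      · intro y hy
        cases List.mem_cons.mp hy with
        | inl h' => subst h'; omega
        | inr h' => exact hm2 y h'
    · have harith : x.2 < m.2 ∨ (x.2 = m.2 ∧ x.1 ≤ m.1) := by
        simp only [Bool.or_eq_true, Bool.and_eq_true, Bool.not_eq_true',
          decide_eq_true_eq, decide_eq_false_iff_not] at hc
        omega
      have hgo : maxLgo m (x :: t) = maxLgo m t := by rw [maxLgo, if_neg hc]
      obtain ⟨hm1, hm2, hm3⟩ := ih m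
      rw [hgo]
      refine ⟨?_, ?_, hm3⟩
      · rcases hm1 with h' | h'
        · exact Or.inl h'
        · exact Or.inr (List.mem_cons_of_mem _ h')
      · intro y hy
        cases List.mem_cons.mp hy with
        | inl h' => subst h'; omega
        | inr h' => exact hm2 y h'

-- B's high selection satisfies pickH
lemma pickH_min2? (xs : List (Int × Int)) (hne : xs ≠ []) :
    ∃ m, PySem.List.min2? xs (fun e => e.2) (fun e => -e.1) = some m ∧ pickH xs m := by
  cases xs with
  | nil => exact absurd rfl hne
  | cons x rest =>
    obtain ⟨hm1, hm2, hm3⟩ := minHgo_spec rest x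
    refine ⟨minHgo x rest, min2?_cons x rest, ?_, ?_⟩
    · rcases hm1 with h' | h'
      · rw [h']; exact List.mem_cons_self
      · exact List.mem_cons_of_mem _ h'
    · intro y hy
      cases List.mem_cons.mp hy with
      | inl h' => subst h'; omega
      | inr h' => exact hm2 y h'

-- B's low selection satisfies pickL
lemma pickL_max2? (xs : List (Int × Int)) (hne : xs ≠ []) :
    ∃ m, PySem.List.max2? xs (fun e => e.2) (fun e => e.1) = some m ∧ pickL xs m := by
  cases xs with
  | nil => exact absurd rfl hne
  | cons x rest =>
    obtain ⟨hm1, hm2, hm3⟩ := maxLgo_spec rest x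
    refine ⟨maxLgo x rest, max2?_cons x rest, ?_, ?_⟩
    · rcases hm1 with h' | h'
      · rw [h']; exact List.mem_cons_self
      · exact List.mem_cons_of_mem _ h'
    · intro y hy
      cases List.mem_cons.mp hy with
      | inl h' => subst h'; omega
      | inr h' => exact hm2 y h'

lemma pickH_unique {xs : List (Int × Int)} (hnd : (xs.map Prod.fst).Nodup) {m1 m2 : Int × Int}
    (h1 : pickH xs m1) (h2 : pickH xs m2) : m1 = m2 := by
  have a1 := h1.2 m2 h2.1
  have a2 := h2.2 m1 h1.1
  have : m1.1 = m2.1 := by omega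
  exact List.inj_on_of_nodup_map hnd h1.1 h2.1 this

lemma pickL_unique {xs : List (Int × Int)} (hnd : (xs.map Prod.fst).Nodup) {m1 m2 : Int × Int}
    (h1 : pickL xs m1) (h2 : pickL xs m2) : m1 = m2 := by
  have a1 := h1.2 m2 h2.1
  have a2 := h2.2 m1 h1.1
  have : m1.1 = m2.1 := by omega
  exact List.inj_on_of_nodup_map hnd h1.1 h2.1 this

lemma pickH_perm {xs ys : List (Int × Int)} (hp : xs.Perm ys) {m : Int × Int}
    (h : pickH xs m) : pickH ys m :=
  ⟨hp.mem_iff.mp h.1, fun y hy => h.2 y (hp.mem_iff.mpr hy)⟩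

lemma pickL_perm {xs ys : List (Int × Int)} (hp : xs.Perm ys) {m : Int × Int}
    (h : pickL xs m) : pickL ys m :=
  ⟨hp.mem_iff.mp h.1, fun y hy => h.2 y (hp.mem_iff.mpr hy)⟩

-- replacing the (unique) occurrence of h by l is, up to permutation, erase-plus-cons
lemma map_replace_perm {h : Int × Int} (l : Int × Int) {xs : List (Int × Int)}
    (hmem : h ∈ xs) (hnd : xs.Nodup) :
    (xs.map (fun e => if e = h then l else e)).Perm (l :: xs.erase h) := by
  induction xs with
  | nil => cases hmem
  | cons z t ih =>
    rcases List.nodup_cons.mp hnd with ⟨hz, hndt⟩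
    by_cases hzh : z = h
    · subst hzh
      have hnt : z ∉ t := hz
      have : t.map (fun e => if e = z then l else e) = t := by
        have : ∀ e ∈ t, (fun e => if e = z then l else e) e = id e := by
          intro e he
          have : e ≠ z := fun hc => hnt (hc ▸ he)
          simp [this]
        rw [List.map_congr_left this, List.map_id]
      simp [List.erase_cons_head, this]
    · have hmt : h ∈ t := by
        cases List.mem_cons.mp hmem with
        | inl h' => exact absurd h'.symm hzh
        | inr h' => exact h'
      rw [List.erase_cons_tail (by simp [hzh])]
      simp only [List.map_cons, if_neg hzh]
      exact ((ih hmt hndt).cons z).trans (List.Perm.swap l z _)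

lemma fst_not_mem_erase {xs : List (Int × Int)} (hnd : (xs.map Prod.fst).Nodup)
    {h : Int × Int} (hmem : h ∈ xs) : h.1 ∉ (xs.erase h).map Prod.fst := by
  intro hk
  obtain ⟨e, he, hfst⟩ := List.mem_map.mp hk
  have he' : e ∈ xs := List.mem_of_mem_erase he
  have : e = h := List.inj_on_of_nodup_map hnd he' hmem hfst
  subst this
  exact (hnd.of_map).not_mem_erase he

-- A's first-match update equals B's pointwise update when ids are distinct
lemma updAll_eq_self (sid pt : Int) (xs : List (Int × Int))
    (h : sid ∉ xs.map Prod.fst) : updAll sid pt xs = xs := by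
  unfold updAll
  have : ∀ e ∈ xs, (fun e : Int × Int => if e.1 = sid then (e.1, e.2 + pt) else e) e = id e := by
    intro e he
    have : e.1 ≠ sid := fun hc => h (hc ▸ List.mem_map_of_mem he)
    simp [this]
  rw [List.map_congr_left this, List.map_id]

lemma addFirstAux_acc (sid pt : Int) : ∀ (xs acc : List (Int × Int)),
    addFirstAux sid pt acc xs = acc.reverse ++ addFirstAux sid pt [] xs := by
  intro xs
  induction xs with
  | nil => intro acc; simp [addFirstAux]
  | cons e rest ih =>
    intro acc
    by_cases h : e.1 = sid
    · simp [addFirstAux, if_pos h]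
    · rw [show addFirstAux sid pt acc (e :: rest) = addFirstAux sid pt (e :: acc) rest from by
        rw [addFirstAux, if_neg h]]
      rw [show addFirstAux sid pt [] (e :: rest) = addFirstAux sid pt [e] rest from by
        rw [addFirstAux, if_neg h]]
      rw [ih (e :: acc), ih [e]]
      simp

lemma addFirst_cons (sid pt : Int) (e : Int × Int) (rest : List (Int × Int)) :
    addFirst sid pt (e :: rest)
    = if e.1 = sid then (e.1, e.2 + pt) :: rest else e :: addFirst sid pt rest := by
  unfold addFirst
  by_cases h : e.1 = sid
  · rw [if_pos h]
    rw [show addFirstAux sid pt [] (e :: rest) = [].reverse ++ (e.1, e.2 + pt) :: rest from by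
      rw [addFirstAux, if_pos h]]
    simp
  · rw [if_neg h]
    rw [show addFirstAux sid pt [] (e :: rest) = addFirstAux sid pt [e] rest from by
      rw [addFirstAux, if_neg h]]
    rw [addFirstAux_acc sid pt rest [e]]
    simp

lemma addFirst_eq_updAll (sid pt : Int) (xs : List (Int × Int))
    (hnd : (xs.map Prod.fst).Nodup) : addFirst sid pt xs = updAll sid pt xs := by
  induction xs with
  | nil => rfl
  | cons e t ih =>
    simp only [List.map_cons, List.nodup_cons] at hnd
    rw [addFirst_cons]
    by_cases h : e.1 = sid
    · rw [if_pos h]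
      have : sid ∉ t.map Prod.fst := h ▸ hnd.1
      rw [show ((e.1, e.2 + pt) :: t : List (Int × Int)) = (e.1, e.2 + pt) :: updAll sid pt t from by
        rw [updAll_eq_self sid pt t this]]
      simp [updAll, h]
    · rw [if_neg h, ih hnd.2]
      simp [updAll, h]

lemma map_fst_updAll (sid pt : Int) (xs : List (Int × Int)) :
    (updAll sid pt xs).map Prod.fst = xs.map Prod.fst := by
  unfold updAll
  rw [List.map_map]
  apply List.map_congr_left
  intro e _
  by_cases h : e.1 = sid <;> simp [h]

-- a no-swap step and the common pre-swap facts, shared by the branches of step_inv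
lemma step_inv (sid pt : Int) {a b : PvSt} (h : PvInv a b) :
    PvInv (stepA sid pt a) (stepB sid pt b) := by
  obtain ⟨HA, LA, ansA⟩ := a
  obtain ⟨HB, LB, ansB⟩ := b
  obtain ⟨hans, hpH, hpL, hndH, hndL, hdisj, hneH, hneL⟩ := h
  simp only at hans hpH hpL hndH hndL hdisj hneH hneL
  subst hans
  -- A-side id-nodup via the permutation
  have hndHA : (HA.map Prod.fst).Nodup := (hpH.map Prod.fst).nodup_iff.mpr hndH
  have hndLA : (LA.map Prod.fst).Nodup := (hpL.map Prod.fst).nodup_iff.mpr hndL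
  have hupdH : addFirst sid pt HA = updAll sid pt HA := addFirst_eq_updAll sid pt HA hndHA
  have hupdL : addFirst sid pt LA = updAll sid pt LA := addFirst_eq_updAll sid pt LA hndLA
  -- facts about the updated lists
  have hpH1 : (updAll sid pt HA).Perm (updAll sid pt HB) := hpH.map _
  have hpL1 : (updAll sid pt LA).Perm (updAll sid pt LB) := hpL.map _
  have hidsH1 : (updAll sid pt HB).map Prod.fst = HB.map Prod.fst := map_fst_updAll sid pt HB
  have hidsL1 : (updAll sid pt LB).map Prod.fst = LB.map Prod.fst := map_fst_updAll sid pt LB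
  have hndH1 : ((updAll sid pt HB).map Prod.fst).Nodup := by rw [hidsH1]; exact hndH
  have hndL1 : ((updAll sid pt LB).map Prod.fst).Nodup := by rw [hidsL1]; exact hndL
  have hdisj1 : ∀ k, k ∈ (updAll sid pt HB).map Prod.fst → k ∉ (updAll sid pt LB).map Prod.fst := by
    rw [hidsH1, hidsL1]; exact hdisj
  have hneH1B : updAll sid pt HB ≠ [] := by
    intro h0; exact hneH (List.map_eq_nil_iff.mp h0)
  have hneL1B : updAll sid pt LB ≠ [] := by
    intro h0; exact hneL (List.map_eq_nil_iff.mp h0)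
  have hneH1A : updAll sid pt HA ≠ [] := by
    intro h0; rw [h0] at hpH1; exact hneH1B hpH1.nil_eq.symm
  have hneL1A : updAll sid pt LA ≠ [] := by
    intro h0; rw [h0] at hpL1; exact hneL1B hpL1.nil_eq.symm
  have hndH1A : ((updAll sid pt HA).map Prod.fst).Nodup := (hpH1.map Prod.fst).nodup_iff.mpr hndH1
  have hndL1A : ((updAll sid pt LA).map Prod.fst).Nodup := (hpL1.map Prod.fst).nodup_iff.mpr hndL1
  -- the two selections agree
  obtain ⟨mh, hmh_eq, hmh_pick⟩ := pickH_min2? (updAll sid pt HB) hneH1B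
  obtain ⟨ml, hml_eq, hml_pick⟩ := pickL_max2? (updAll sid pt LB) hneL1B
  have hHeq : PySem.List.pyGetD
      (sortHighA (updAll sid pt HA)) (-1) (0, 0) = mh :=
    pickH_unique hndH1 (pickH_perm hpH1 (pickH_sortedA (updAll sid pt HA) hneH1A)) hmh_pick
  have hLeq : PySem.List.pyGetD
      (sortLowA (updAll sid pt LA)) (-1) (0, 0) = ml :=
    pickL_unique hndL1 (pickL_perm hpL1 (pickL_sortedA (updAll sid pt LA) hneL1A)) hml_pick
  have hmhH : mh.1 ∈ (updAll sid pt HB).map Prod.fst := List.mem_map_of_mem hmh_pick.1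
  have hmlL : ml.1 ∈ (updAll sid pt LB).map Prod.fst := List.mem_map_of_mem hml_pick.1
  have hne_ids : mh.1 ≠ ml.1 := fun hq => hdisj1 mh.1 hmhH (hq ▸ hmlL)
  -- abbreviations for the sorted A-side lists
  have hspermH : (sortHighA (updAll sid pt HA)).Perm (updAll sid pt HA) := List.mergeSort_perm _ _
  have hspermL : (sortLowA (updAll sid pt LA)).Perm (updAll sid pt LA) := List.mergeSort_perm _ _
  have hsneH : sortHighA (updAll sid pt HA) ≠ [] := by
    intro h0; rw [h0] at hspermH; exact hneH1A hspermH.nil_eq.symm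
  have hsneL : sortLowA (updAll sid pt LA) ≠ [] := by
    intro h0; rw [h0] at hspermL; exact hneL1A hspermL.nil_eq.symm
  -- unfold both steps; the picks become mh and ml
  show PvInv (stepA sid pt (HA, LA, ansA)) (stepB sid pt (HB, LB, ansA))
  simp only [stepA, stepB]
  rw [hupdH, hupdL, hmh_eq, hml_eq, hHeq, hLeq]
  simp only [Option.getD_some]
  have hAperm : (sortHighA (updAll sid pt HA)).Perm
      (updAll sid pt HB) := hspermH.trans hpH1
  have hALperm : (sortLowA (updAll sid pt LA)).Perm
      (updAll sid pt LB) := hspermL.trans hpL1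
  have hnoswap : PvInv
      (sortHighA (updAll sid pt HA),
       sortLowA (updAll sid pt LA), ansA)
      (updAll sid pt HB, updAll sid pt LB, ansA) :=
    ⟨rfl, hAperm, hALperm, hndH1, hndL1, hdisj1, hneH1B, hneL1B⟩
  by_cases hsw : mh.2 < ml.2 ∨ (mh.2 = ml.2 ∧ -mh.1 < -ml.1)
  · rw [if_pos hsw, if_pos (show mh.2 ≤ ml.2 by omega),
        if_neg (show ¬(mh.2 = ml.2 ∧ mh.1 < ml.1) by omega)]
    -- the swap branch
    -- A's popped elements are exactly mh and ml
    have hlastH : (sortHighA (updAll sid pt HA)).getLast hsneH = mh := by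
      rw [PySem.List.pyGetD_neg_one _ _ hsneH] at hHeq; exact hHeq
    have hlastL : (sortLowA (updAll sid pt LA)).getLast hsneL = ml := by
      rw [PySem.List.pyGetD_neg_one _ _ hsneL] at hLeq; exact hLeq
    have hsplitH : (sortHighA (updAll sid pt HA)).dropLast ++ [mh]
        = sortHighA (updAll sid pt HA) := by
      rw [← hlastH]; exact List.dropLast_append_getLast hsneH
    have hsplitL : (sortLowA (updAll sid pt LA)).dropLast ++ [ml]
        = sortLowA (updAll sid pt LA) := by
      rw [← hlastL]; exact List.dropLast_append_getLast hsneL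
    have hndSH : (sortHighA (updAll sid pt HA)).Nodup :=
      List.Nodup.of_map Prod.fst ((hAperm.map Prod.fst).nodup_iff.mpr hndH1)
    have hndSL : (sortLowA (updAll sid pt LA)).Nodup :=
      List.Nodup.of_map Prod.fst ((hALperm.map Prod.fst).nodup_iff.mpr hndL1)
    have hnotinH : mh ∉ (sortHighA (updAll sid pt HA)).dropLast := by
      intro hin
      have := hndSH
      rw [← hsplitH, List.nodup_append] at this
      exact this.2.2 mh hin mh (List.mem_singleton_self mh) rfl
    have hnotinL : ml ∉ (sortLowA (updAll sid pt LA)).dropLast := by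
      intro hin
      have := hndSL
      rw [← hsplitL, List.nodup_append] at this
      exact this.2.2 ml hin ml (List.mem_singleton_self ml) rfl
    have heraseH : (sortHighA (updAll sid pt HA)).erase mh
        = (sortHighA (updAll sid pt HA)).dropLast := by
      conv_lhs => rw [← hsplitH]
      rw [List.erase_append_right _ hnotinH, List.erase_cons_head]
      simp
    have heraseL : (sortLowA (updAll sid pt LA)).erase ml
        = (sortLowA (updAll sid pt LA)).dropLast := by
      conv_lhs => rw [← hsplitL]
      rw [List.erase_append_right _ hnotinL, List.erase_cons_head]
      simp
    -- permutations of the swapped lists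
    have hrepH := map_replace_perm ml hmh_pick.1 (List.Nodup.of_map Prod.fst hndH1)
    have hrepL := map_replace_perm mh hml_pick.1 (List.Nodup.of_map Prod.fst hndL1)
    have hpermHnew : ((sortHighA (updAll sid pt HA)).dropLast ++ [ml]).Perm
        ((updAll sid pt HB).map (fun e => if e = mh then ml else e)) := by
      refine (List.perm_append_singleton ml _).trans ?_
      rw [← heraseH]
      exact ((hAperm.erase mh).cons ml).trans hrepH.symm
    have hpermLnew : ((sortLowA (updAll sid pt LA)).dropLast ++ [mh]).Perm
        ((updAll sid pt LB).map (fun e => if e = ml then mh else e)) := by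
      refine (List.perm_append_singleton mh _).trans ?_
      rw [← heraseL]
      exact ((hALperm.erase ml).cons mh).trans hrepL.symm
    -- id lists of the swapped B-side lists
    have hidsnewH : (((updAll sid pt HB).map (fun e => if e = mh then ml else e)).map Prod.fst).Perm
        (ml.1 :: ((updAll sid pt HB).erase mh).map Prod.fst) := by
      have := hrepH.map Prod.fst
      simpa using this
    have hidsnewL : (((updAll sid pt LB).map (fun e => if e = ml then mh else e)).map Prod.fst).Perm
        (mh.1 :: ((updAll sid pt LB).erase ml).map Prod.fst) := by
      have := hrepL.map Prod.fst
      simpa using this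
    have hsubH : ((updAll sid pt HB).erase mh).map Prod.fst ⊆ (updAll sid pt HB).map Prod.fst :=
      (List.Sublist.map Prod.fst (List.erase_sublist)).subset
    have hsubL : ((updAll sid pt LB).erase ml).map Prod.fst ⊆ (updAll sid pt LB).map Prod.fst :=
      (List.Sublist.map Prod.fst (List.erase_sublist)).subset
    have hmlnotH : ml.1 ∉ (updAll sid pt HB).map Prod.fst := fun hin => hdisj1 ml.1 hin hmlL
    have hndeH : (((updAll sid pt HB).erase mh).map Prod.fst).Nodup :=
      (List.Sublist.map Prod.fst (List.erase_sublist)).nodup hndH1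
    have hndeL : (((updAll sid pt LB).erase ml).map Prod.fst).Nodup :=
      (List.Sublist.map Prod.fst (List.erase_sublist)).nodup hndL1
    have hmh_note : mh.1 ∉ ((updAll sid pt HB).erase mh).map Prod.fst :=
      fst_not_mem_erase hndH1 hmh_pick.1
    have hml_note : ml.1 ∉ ((updAll sid pt LB).erase ml).map Prod.fst :=
      fst_not_mem_erase hndL1 hml_pick.1
    refine ⟨rfl, hpermHnew, hpermLnew, ?_, ?_, ?_, ?_, ?_⟩
    · exact hidsnewH.nodup_iff.mpr (List.nodup_cons.mpr ⟨fun hin => hmlnotH (hsubH hin), hndeH⟩)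
    · exact hidsnewL.nodup_iff.mpr (List.nodup_cons.mpr
        ⟨fun hin => hdisj1 mh.1 hmhH (hsubL hin), hndeL⟩)
    · intro k hk hk'
      have hk1 := hidsnewH.mem_iff.mp hk
      have hk2 := hidsnewL.mem_iff.mp hk'
      cases List.mem_cons.mp hk1 with
      | inl hkml =>
        cases List.mem_cons.mp hk2 with
        | inl hkmh => exact hne_ids (by omega)
        | inr hkin => exact hml_note (hkml ▸ hkin)
      | inr hkin =>
        have hkH : k ∈ (updAll sid pt HB).map Prod.fst := hsubH hkin
        cases List.mem_cons.mp hk2 with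
        | inl hkmh => exact hmh_note (hkmh ▸ hkin)
        | inr hkin' => exact hdisj1 k hkH (hsubL hkin')
    · intro h0; exact hneH1B (List.map_eq_nil_iff.mp h0)
    · intro h0; exact hneL1B (List.map_eq_nil_iff.mp h0)
  · rw [if_neg hsw]
    by_cases houter : mh.2 ≤ ml.2
    · rw [if_pos houter, if_pos (show mh.2 = ml.2 ∧ mh.1 < ml.1 by omega)]
      exact hnoswap
    · rw [if_neg houter]
      exact hnoswap

lemma fold_inv (zs : List (Int × Int)) : ∀ (a b : PvSt), PvInv a b →
    PvInv (zs.foldl (fun st q => stepA q.1 q.2 st) a) (zs.foldl (fun st q => stepB q.1 q.2 st) b) := by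
  induction zs with
  | nil => intro a b h; exact h
  | cons q zs ih => intro a b h; exact ih _ _ (step_inv q.1 q.2 h)

-- A's index loop over range(len(student)) is the fold over zip(student, point)
lemma foldl_range_zip {σ : Type} (f : σ → Int → Int → σ) :
    ∀ (xs ys pre qre : List Int) (s : σ), pre.length = qre.length → xs.length ≤ ys.length →
    (PySem.List.pyRange (pre.length) ((pre.length : Int) + xs.length) 1).foldl
      (fun st i => f st (PySem.List.pyGetD (pre ++ xs) i 0) (PySem.List.pyGetD (qre ++ ys) i 0)) s
    = (xs.zip ys).foldl (fun st q => f st q.1 q.2) s := by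
  intro xs
  induction xs with
  | nil =>
    intro ys pre qre s hpq hlen
    rw [PySem.List.pyRange_one_eq_nil (by simp)]
    simp
  | cons x xs ih =>
    intro ys pre qre s hpq hlen
    cases ys with
    | nil => simp at hlen
    | cons y ys' =>
      rw [PySem.List.pyRange_one_cons (by simp only [List.length_cons]; omega)]
      rw [List.foldl_cons]
      have h1 : PySem.List.pyGetD (pre ++ x :: xs) (pre.length) 0 = x := by
        unfold PySem.List.pyGetD
        rw [PySem.List.pyGet?_append_length]
        rfl
      have h2 : PySem.List.pyGetD (qre ++ y :: ys') (pre.length) 0 = y := by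
        unfold PySem.List.pyGetD
        rw [hpq, PySem.List.pyGet?_append_length]
        rfl
      rw [h1, h2]
      rw [show pre ++ x :: xs = (pre ++ [x]) ++ xs by simp]
      rw [show qre ++ y :: ys' = (qre ++ [y]) ++ ys' by simp]
      rw [show ((pre.length : Int) + 1) = (((pre ++ [x]).length : Int)) by simp]
      rw [show ((pre.length : Int) + ((x :: xs).length : Int)) = (((pre ++ [x]).length : Int) + (xs.length : Int)) by
        simp; omega]
      rw [List.zip_cons_cons, List.foldl_cons]
      exact ih ys' (pre ++ [x]) (qre ++ [y]) _ (by simp [hpq]) (by simpa using hlen)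

-- ===== VERDICT (by name: the statement is the Claim_ definition above) =====
theorem solution_spec : Claim_equal_solution := by
  intro n student point _hdom hpre
  obtain ⟨hlen, hn2⟩ := hpre
  unfold Spec_solution
  cases student with
  | nil =>
    rw [show solution n [] point = 0 from by
      unfold solution
      rw [PySem.List.pyRange_one_eq_nil (by simp [PySem.List.len_eq])]
      rfl]
    rfl
  | cons s0 st' =>
    have hn : 2 ≤ n := hn2 (by simp)
    have hmid1 : 1 ≤ PySem.Int.floordiv (n + 1) 2 := by
      rw [PySem.Int.le_floordiv_iff_mul_le (by norm_num)]; omega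
    have hmidn : PySem.Int.floordiv (n + 1) 2 < n := by
      rw [PySem.Int.floordiv_lt_iff_lt_mul (by norm_num)]; omega
    set mid := PySem.Int.floordiv (n + 1) 2 with hmid
    set H0 : List (Int × Int) := (PySem.List.pyRange 1 (mid + 1) 1).map (fun i => (i, (0 : Int))) with hH0
    set L0 : List (Int × Int) := (PySem.List.pyRange (mid + 1) (n + 1) 1).map (fun i => (i, (0 : Int))) with hL0
    have hidsH : H0.map Prod.fst = PySem.List.pyRange 1 (mid + 1) 1 := by
      rw [hH0, List.map_map]
      exact (List.map_congr_left (fun a _ => rfl)).trans (List.map_id _)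
    have hidsL : L0.map Prod.fst = PySem.List.pyRange (mid + 1) (n + 1) 1 := by
      rw [hL0, List.map_map]
      exact (List.map_congr_left (fun a _ => rfl)).trans (List.map_id _)
    have hinv0 : PvInv (H0, L0, 0) (H0, L0, 0) := by
      refine ⟨rfl, List.Perm.refl _, List.Perm.refl _, ?_, ?_, ?_, ?_, ?_⟩
      · rw [hidsH]; exact PySem.List.nodup_pyRange_one 1 (mid + 1)
      · rw [hidsL]; exact PySem.List.nodup_pyRange_one (mid + 1) (n + 1)
      · intro k hk hk'
        rw [hidsH] at hk
        rw [hidsL] at hk'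
        rw [PySem.List.mem_pyRange_one] at hk hk'
        omega
      · have hl : H0.length ≠ 0 := by
          rw [hH0, List.length_map, PySem.List.length_pyRange_one]; omega
        have hne : H0 ≠ [] := by intro h0; rw [h0] at hl; exact hl rfl
        exact hne
      · have hl : L0.length ≠ 0 := by
          rw [hL0, List.length_map, PySem.List.length_pyRange_one]; omega
        have hne : L0 ≠ [] := by intro h0; rw [h0] at hl; exact hl rfl
        exact hne
    have hz := foldl_range_zip (fun st a b => stepA a b st) (s0 :: st') point [] []
        ((H0, L0, 0) : PvSt) rfl hlen
    simp only [List.nil_append, List.length_nil, Nat.cast_zero, zero_add] at hz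
    have hA : solution n (s0 :: st') point
        = (((s0 :: st').zip point).foldl (fun st q => stepA q.1 q.2 st) (H0, L0, 0)).2.2 := by
      rw [show solution n (s0 :: st') point
          = (List.foldl (fun st i => stepA (PySem.List.pyGetD (s0 :: st') i 0) (PySem.List.pyGetD point i 0) st)
              (H0, L0, 0) (PySem.List.pyRange 0 (PySem.List.len (s0 :: st')) 1)).2.2 from rfl]
      rw [PySem.List.len_eq, hz]
    have hB : solution_alt n (s0 :: st') point
        = (((s0 :: st').zip point).foldl (fun st q => stepB q.1 q.2 st) (H0, L0, 0)).2.2 := rfl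
    rw [hA, hB]
    exact (fold_inv ((s0 :: st').zip point) _ _ hinv0).1
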